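-- pv_equiv track=rewrite | github.com/exceptional007/OMR-Evaluation-System | app/services/omr.py | format_answers_as_columns
-- ===== SOURCE A (Python) =====
-- from typing import Dict, Any, List, Tuple
--
-- def subject_for_question(q: int) -> str:
--     if 1 <= q <= 20:
--         return "Python"
--     if 21 <= q <= 40:
--         return "EDA"
--     if 41 <= q <= 60:
--         return "SQL"
--     if 61 <= q <= 80:
--         return "POWER BI"
--     return "Statistics"  # 81..100
--
-- def format_answers_as_columns(answers: List[str]) -> Dict[str, List[str]]:
--     """Produce a 5-column layout like the provided template with strings 'n - x'."""
--     columns: Dict[str, List[str]] = {s: [] for s in ["Python", "EDA", "SQL", "POWER BI", "Statistics"]}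
--     for q, ans in enumerate(answers, start=1):
--         s = subject_for_question(q)
--         columns[s].append(f"{q} - {ans}")
--     # Ensure 20 rows per subject
--     for s in columns:
--         if len(columns[s]) < 20:
--             columns[s] += [""] * (20 - len(columns[s]))
--     return columns
-- ===== SOURCE B (Python) =====
-- def format_answers_as_columns(answers):
--     """Slice the answers into the five fixed subject segments, then format and pad each."""
--     def col(seg, start):
--         out = [f"{q} - {a}" for q, a in enumerate(seg, start)]
--         return out + [""] * (20 - len(out))
--     return {
--         "Python": col(answers[0:20], 1),
--         "EDA": col(answers[20:40], 21),
--         "SQL": col(answers[40:60], 41),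
--         "POWER BI": col(answers[60:80], 61),
--         "Statistics": col(answers[80:], 81),
--     }
-- ===== Notes on version B (the rewrite author's own statement) =====
-- stated objective: alternative
-- what changed: B partitions the input into the five fixed slices (answers[0:20], [20:40], [40:60], [60:80], [80:]) and formats each segment from its known starting question number, instead of A's single pass that classifies every question number through subject_for_question and appends into a dict built incrementally.
import Mathlib
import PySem

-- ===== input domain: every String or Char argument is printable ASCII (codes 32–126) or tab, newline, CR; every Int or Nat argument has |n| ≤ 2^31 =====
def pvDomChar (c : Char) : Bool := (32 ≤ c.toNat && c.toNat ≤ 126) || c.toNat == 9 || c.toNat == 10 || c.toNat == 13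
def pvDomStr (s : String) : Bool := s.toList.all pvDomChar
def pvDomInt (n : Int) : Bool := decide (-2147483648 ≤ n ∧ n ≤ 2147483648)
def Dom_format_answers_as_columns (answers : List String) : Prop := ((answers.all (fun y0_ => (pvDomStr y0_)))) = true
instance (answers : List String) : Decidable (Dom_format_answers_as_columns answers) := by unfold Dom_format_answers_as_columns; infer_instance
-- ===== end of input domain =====

-- B slices the input into the five fixed subject segments and formats each from its known
-- starting question number, instead of A's single enumerate pass with per-question subject
-- lookup into an incrementally built dict (objective: alternative decomposition, same cost).

-- ===== PORT A =====
def subject_for_question (q : Int) : String :=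
  if 1 ≤ q ∧ q ≤ 20 then "Python"
  else if 21 ≤ q ∧ q ≤ 40 then "EDA"
  else if 41 ≤ q ∧ q ≤ 60 then "SQL"
  else if 61 ≤ q ∧ q ≤ 80 then "POWER BI"
  else "Statistics"

def format_answers_as_columns (answers : List String) : List (String × List String) :=
  let columns0 : PySem.Dict String (List String) :=
    PySem.Dict.ofList [("Python", []), ("EDA", []), ("SQL", []), ("POWER BI", []), ("Statistics", [])]
  let columns1 := (PySem.List.enumerate answers 1).foldl
    (fun d p => d.modify (subject_for_question p.1) []
      (fun v => v ++ [PySem.Int.toStr p.1 ++ " - " ++ p.2])) columns0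
  -- 'for s in columns: if len(columns[s]) < 20: columns[s] += [""] * (20 - len(columns[s]))'
  let columns2 := columns1.keys.foldl
    (fun d s => d.modify s []
      (fun v => if v.length < 20 then v ++ List.replicate (20 - v.length) "" else v)) columns1
  columns2.items

-- ===== PORT B =====
def pvFmt (q : Int) : List String → List String
  | [] => []
  | a :: rest => (PySem.Int.toStr q ++ " - " ++ a) :: pvFmt (q + 1) rest

def pvCol (seg : List String) (start : Int) : List String :=
  let out := pvFmt start seg
  out ++ List.replicate (20 - out.length) ""

def format_answers_as_columns_alt (answers : List String) : List (String × List String) :=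
  [("Python",     pvCol (PySem.List.slice answers (some 0) (some 20)) 1),
   ("EDA",        pvCol (PySem.List.slice answers (some 20) (some 40)) 21),
   ("SQL",        pvCol (PySem.List.slice answers (some 40) (some 60)) 41),
   ("POWER BI",   pvCol (PySem.List.slice answers (some 60) (some 80)) 61),
   ("Statistics", pvCol (PySem.List.slice answers (some 80) none) 81)]

-- ===== PRECONDITION & SPEC =====
def Spec_format_answers_as_columns (answers : List String) (out : List (String × List String)) : Prop := out = format_answers_as_columns_alt answers
instance (answers : List String) (out : List (String × List String)) : Decidable (Spec_format_answers_as_columns answers out) := by unfold Spec_format_answers_as_columns; infer_instance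

-- ===== CLAIM (what is proved, stated in full; the proofs are below) =====
def Claim_equal_format_answers_as_columns : Prop := ∀ (answers : List String), Dom_format_answers_as_columns answers → Spec_format_answers_as_columns answers (format_answers_as_columns answers)

-- ===== LEMMAS AND PROOFS =====

-- G c q xs: the entries A's first loop appends into column c, scanning xs with question numbers from q.
def pvG (c : String) (q : Int) (xs : List String) : List String :=
  (((PySem.List.enumerate xs q).map
      (fun p => (subject_for_question p.1, PySem.Int.toStr p.1 ++ " - " ++ p.2))).filter
    (fun r => r.1 == c)).map (·.2)

lemma pvG_nil (c : String) (q : Int) : pvG c q [] = [] := rfl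

lemma pvG_cons (c : String) (q : Int) (a : String) (xs : List String) :
    pvG c q (a :: xs) =
      (if subject_for_question q = c then [PySem.Int.toStr q ++ " - " ++ a] else []) ++
        pvG c (q + 1) xs := by
  simp only [pvG, PySem.List.enumerate_cons, List.map_cons, List.filter_cons]
  by_cases h : subject_for_question q = c
  · simp [h]
  · simp [h]

lemma pvG_append (c : String) (q : Int) (xs ys : List String) :
    pvG c q (xs ++ ys) = pvG c q xs ++ pvG c (q + xs.length) ys := by
  simp [pvG, PySem.List.enumerate_append, List.filter_append]

lemma pvG_all (c : String) (q : Int) (xs : List String)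
    (h : ∀ j : Nat, j < xs.length → subject_for_question (q + j) = c) :
    pvG c q xs = pvFmt q xs := by
  induction xs generalizing q with
  | nil => rfl
  | cons a xs ih =>
      have h0 : subject_for_question q = c := by simpa using h 0 (by simp)
      rw [pvG_cons, h0, if_pos rfl, pvFmt]
      simp only [List.singleton_append, List.cons.injEq, true_and]
      apply ih
      intro j hj
      have := h (j + 1) (by simpa using Nat.succ_lt_succ hj)
      convert this using 2
      omega

lemma pvG_none (c : String) (q : Int) (xs : List String)
    (h : ∀ j : Nat, j < xs.length → subject_for_question (q + j) ≠ c) :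
    pvG c q xs = [] := by
  induction xs generalizing q with
  | nil => rfl
  | cons a xs ih =>
      have h0 : subject_for_question q ≠ c := by simpa using h 0 (by simp)
      rw [pvG_cons, if_neg h0]
      simp only [List.nil_append]
      apply ih
      intro j hj
      have := h (j + 1) (by simpa using Nat.succ_lt_succ hj)
      convert this using 2
      omega

lemma subj_mem (q : Int) :
    subject_for_question q ∈ ["Python", "EDA", "SQL", "POWER BI", "Statistics"] := by
  unfold subject_for_question
  split_ifs <;> simp

lemma pad_eq (v : List String) :
    (if v.length < 20 then v ++ List.replicate (20 - v.length) "" else v) =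
      v ++ List.replicate (20 - v.length) "" := by
  split_ifs with h
  · rfl
  · have : 20 - v.length = 0 := by omega
    simp [this]

-- the five column characterisations: A's column c equals B's formatted segment
lemma col_python (answers : List String) :
    pvG "Python" 1 answers = pvFmt 1 (answers.take 20) := by
  conv_lhs => rw [← List.take_append_drop 20 answers]
  rw [pvG_append]
  have h1 : pvG "Python" 1 (answers.take 20) = pvFmt 1 (answers.take 20) := by
    apply pvG_all
    intro j hj
    have hj20 : j < 20 := lt_of_lt_of_le hj (List.length_take_le 20 answers)
    unfold subject_for_question
    rw [if_pos (by constructor <;> omega)]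
  have h2 : pvG "Python" (1 + (answers.take 20).length) (answers.drop 20) = [] := by
    apply pvG_none
    intro j hj
    by_cases hn : answers.length ≤ 20
    · simp [List.drop_eq_nil_of_le hn] at hj
    · have hlen : (answers.take 20).length = 20 := by
        rw [List.length_take]; omega
      rw [hlen]
      unfold subject_for_question
      split_ifs <;> first | omega | simp
  rw [h1, h2, List.append_nil]

lemma col_middle (c : String) (k : Nat)
    (hc : ∀ q : Int, (k : Int) + 1 ≤ q → q ≤ (k : Int) + 20 → subject_for_question q = c)
    (hlo : ∀ q : Int, 1 ≤ q → q ≤ (k : Int) → subject_for_question q ≠ c)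
    (hhi : ∀ q : Int, (k : Int) + 21 ≤ q → subject_for_question q ≠ c)
    (answers : List String) :
    pvG c 1 answers = pvFmt ((k : Int) + 1) ((answers.drop k).take 20) := by
  have hsplit : answers = answers.take k ++ ((answers.drop k).take 20 ++ (answers.drop k).drop 20) := by
    rw [List.take_append_drop, List.take_append_drop]
  conv_lhs => rw [hsplit]
  rw [pvG_append, pvG_append]
  have hpre : pvG c 1 (answers.take k) = [] := by
    apply pvG_none
    intro j hj
    have hjk : j < k := lt_of_lt_of_le hj (List.length_take_le k answers)
    exact hlo (1 + j) (by omega) (by omega)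
  by_cases hn : answers.length ≤ k
  · simp [hpre, List.drop_eq_nil_of_le hn, pvG_nil, pvFmt]
  · have hlt : (answers.take k).length = k := by rw [List.length_take]; omega
    have hmid : pvG c (1 + (answers.take k).length) ((answers.drop k).take 20) =
        pvFmt ((k : Int) + 1) ((answers.drop k).take 20) := by
      rw [hlt]
      have : (1 : Int) + (k : Nat) = (k : Int) + 1 := by ring
      rw [this]
      apply pvG_all
      intro j hj
      have hj20 : j < 20 := lt_of_lt_of_le hj (List.length_take_le 20 (answers.drop k))
      exact hc _ (by omega) (by omega)
    have hsuf : pvG c (1 + (answers.take k).length + ((answers.drop k).take 20).length)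
        ((answers.drop k).drop 20) = [] := by
      apply pvG_none
      intro j hj
      by_cases hn2 : answers.length ≤ k + 20
      · have : (answers.drop k).length ≤ 20 := by simp [List.length_drop]; omega
        simp [List.drop_eq_nil_of_le this] at hj
      · have h20 : ((answers.drop k).take 20).length = 20 := by
          rw [List.length_take, List.length_drop]; omega
        rw [hlt, h20]
        apply hhi
        push_cast
        omega
    rw [hpre, hmid, hsuf, List.nil_append, List.append_nil]

lemma col_stat (answers : List String) :
    pvG "Statistics" 1 answers = pvFmt 81 (answers.drop 80) := by
  conv_lhs => rw [← List.take_append_drop 80 answers]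
  rw [pvG_append]
  have hpre : pvG "Statistics" 1 (answers.take 80) = [] := by
    apply pvG_none
    intro j hj
    have hj80 : j < 80 := lt_of_lt_of_le hj (List.length_take_le 80 answers)
    unfold subject_for_question
    split_ifs <;> first | omega | simp
  by_cases hn : answers.length ≤ 80
  · simp [hpre, List.drop_eq_nil_of_le hn, pvG_nil, pvFmt]
  · have hlt : (answers.take 80).length = 80 := by rw [List.length_take]; omega
    have hmid : pvG "Statistics" (1 + (answers.take 80).length) (answers.drop 80) =
        pvFmt 81 (answers.drop 80) := by
      rw [hlt]
      norm_num
      apply pvG_all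
      intro j hj
      unfold subject_for_question
      split_ifs <;> first | omega | rfl
    rw [hpre, hmid, List.nil_append]

lemma set_update_of_forall_mem {α : Type} [BEq α] [LawfulBEq α]
    (s : PySem.Set α) (xs : List α) (h : ∀ x ∈ xs, x ∈ s) :
    PySem.Set.update s xs = s := by
  induction xs generalizing s with
  | nil => rfl
  | cons a xs ih =>
      have : PySem.Set.add s a = s := PySem.Set.add_of_mem (h a (by simp))
      show List.foldl PySem.Set.add (PySem.Set.add s a) xs = s
      rw [this]
      exact ih s (fun x hx => h x (by simp [hx]))

lemma slice_0_20 (answers : List String) :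
    PySem.List.slice answers (some 0) (some 20) = answers.take 20 := by
  rw [PySem.List.slice_toNat] <;> simp [Int.toNat]

lemma slice_20_40 (answers : List String) :
    PySem.List.slice answers (some 20) (some 40) = (answers.drop 20).take 20 := by
  rw [PySem.List.slice_toNat] <;> simp [Int.toNat]

lemma slice_40_60 (answers : List String) :
    PySem.List.slice answers (some 40) (some 60) = (answers.drop 40).take 20 := by
  rw [PySem.List.slice_toNat] <;> simp [Int.toNat]

lemma slice_60_80 (answers : List String) :
    PySem.List.slice answers (some 60) (some 80) = (answers.drop 60).take 20 := by
  rw [PySem.List.slice_toNat] <;> simp [Int.toNat]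

lemma slice_80_none (answers : List String) :
    PySem.List.slice answers (some 80) none = answers.drop 80 := by
  rw [PySem.List.slice_from] <;> simp [Int.toNat]

lemma col_eda (answers : List String) :
    pvG "EDA" 1 answers = pvFmt 21 ((answers.drop 20).take 20) := by
  have := col_middle "EDA" 20
    (fun q h1 h2 => by unfold subject_for_question; split_ifs <;> first | omega | rfl)
    (fun q h1 h2 => by unfold subject_for_question; split_ifs <;> first | omega | simp)
    (fun q h1 => by unfold subject_for_question; split_ifs <;> first | omega | simp) answers
  simpa using this

lemma col_sql (answers : List String) :
    pvG "SQL" 1 answers = pvFmt 41 ((answers.drop 40).take 20) := by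
  have := col_middle "SQL" 40
    (fun q h1 h2 => by unfold subject_for_question; split_ifs <;> first | omega | rfl)
    (fun q h1 h2 => by unfold subject_for_question; split_ifs <;> first | omega | simp)
    (fun q h1 => by unfold subject_for_question; split_ifs <;> first | omega | simp) answers
  simpa using this

lemma col_pb (answers : List String) :
    pvG "POWER BI" 1 answers = pvFmt 61 ((answers.drop 60).take 20) := by
  have := col_middle "POWER BI" 60
    (fun q h1 h2 => by unfold subject_for_question; split_ifs <;> first | omega | rfl)
    (fun q h1 h2 => by unfold subject_for_question; split_ifs <;> first | omega | simp)
    (fun q h1 => by unfold subject_for_question; split_ifs <;> first | omega | simp) answers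
  simpa using this

-- ===== VERDICT (by name: the statement is the Claim_ definition above) =====
theorem format_answers_as_columns_spec : Claim_equal_format_answers_as_columns := by
  intro answers _
  show format_answers_as_columns answers = format_answers_as_columns_alt answers
  set D0 : PySem.Dict String (List String) :=
    PySem.Dict.ofList [("Python", []), ("EDA", []), ("SQL", []), ("POWER BI", []), ("Statistics", [])]
    with hD0def
  set D1 := (PySem.List.enumerate answers 1).foldl
    (fun d p => d.modify (subject_for_question p.1) []
      (fun v => v ++ [PySem.Int.toStr p.1 ++ " - " ++ p.2])) D0 with hD1def
  show (D1.keys.foldl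
    (fun d s => d.modify s []
      (fun v => if v.length < 20 then v ++ List.replicate (20 - v.length) "" else v)) D1).items
    = format_answers_as_columns_alt answers
  have hK1 : D1.keys = ["Python", "EDA", "SQL", "POWER BI", "Statistics"] := by
    rw [hD1def, PySem.Dict.keys_foldl_modify_key (PySem.List.enumerate answers 1)
      (fun p => subject_for_question p.1) []
      (fun _ p => fun v => v ++ [PySem.Int.toStr p.1 ++ " - " ++ p.2]) D0]
    apply set_update_of_forall_mem
    intro x hx
    obtain ⟨p, _, rfl⟩ := List.mem_map.mp hx
    exact subj_mem p.1
  have hmap : D1 = List.foldl (fun d (p : String × String) => d.modify p.1 [] (fun v => v ++ [p.2])) D0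
      ((PySem.List.enumerate answers 1).map
        (fun p : Int × String => (subject_for_question p.1, PySem.Int.toStr p.1 ++ " - " ++ p.2))) := by
    rw [hD1def]
    exact (List.foldl_map
      (f := fun p : Int × String => (subject_for_question p.1, PySem.Int.toStr p.1 ++ " - " ++ p.2))
      (g := fun d (p : String × String) => d.modify p.1 [] (fun v => v ++ [p.2]))
      (l := PySem.List.enumerate answers 1) (init := D0)).symm
  have hG : ∀ c, D1.getD c [] = D0.getD c [] ++ pvG c 1 answers := by
    intro c
    rw [hmap, PySem.Dict.getD_foldl_modify_append]
    rfl
  rw [hK1]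
  set padf : List String → List String :=
    fun v => if v.length < 20 then v ++ List.replicate (20 - v.length) "" else v with hpadf
  set D2 := (["Python", "EDA", "SQL", "POWER BI", "Statistics"] : List String).foldl
    (fun d s => d.modify s [] padf) D1 with hD2def
  have hK2 : D2.keys = ["Python", "EDA", "SQL", "POWER BI", "Statistics"] := by
    rw [hD2def, PySem.Dict.keys_foldl_modify _ [] (fun _ _ => padf) D1, hK1]
    apply set_update_of_forall_mem
    intro x hx
    exact hx
  have hgetD2 : ∀ c ∈ (["Python", "EDA", "SQL", "POWER BI", "Statistics"] : List String),
      D2.getD c [] = padf (D1.getD c []) := by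
    intro c hc
    rw [hD2def]
    simp only [List.foldl_cons, List.foldl_nil, PySem.Dict.getD_modify]
    fin_cases hc <;> simp
  rw [PySem.Dict.items_eq_map_keys D2 (by rw [hK2]; decide) [], hK2]
  simp only [List.map_cons, List.map_nil]
  rw [hgetD2 "Python" (by decide), hgetD2 "EDA" (by decide), hgetD2 "SQL" (by decide),
    hgetD2 "POWER BI" (by decide), hgetD2 "Statistics" (by decide),
    hG "Python", hG "EDA", hG "SQL", hG "POWER BI", hG "Statistics"]
  have hD0g : ∀ c ∈ (["Python", "EDA", "SQL", "POWER BI", "Statistics"] : List String),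
      D0.getD c [] = ([] : List String) := by
    intro c hc
    rw [hD0def]
    fin_cases hc <;> rfl
  rw [hD0g "Python" (by decide), hD0g "EDA" (by decide), hD0g "SQL" (by decide),
    hD0g "POWER BI" (by decide), hD0g "Statistics" (by decide)]
  simp only [List.nil_append]
  rw [col_python, col_eda, col_sql, col_pb, col_stat]
  show _ = format_answers_as_columns_alt answers
  unfold format_answers_as_columns_alt
  rw [slice_0_20, slice_20_40, slice_40_60, slice_60_80, slice_80_none]
  simp only [pvCol, hpadf, pad_eq]
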